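-- pv_equiv track=rewrite | github.com/ftakanashi/QE_scripts | source-mt-align/generate_pair_tags.py | generate_pair_tags
-- ===== SOURCE A (Python) =====
-- import collections
--
-- def get_align_dict(aligns, reverse=False):
--     if type(aligns) is str:
--         aligns = aligns.split()
--
--     d = collections.defaultdict(list)
--     for a in aligns:
--         i, j = map(int, a.split('-'))
--         if reverse:
--             d[j].append(i)
--         else:
--             d[i].append(j)
--
--     return d
--
-- def generate_pair_tags(align_line, src_tags_line, tgt_tags_line):
--
--     align_dict = get_align_dict(align_line)
--     rev_align_dict = get_align_dict(align_line, reverse=True)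
--     src_tags = src_tags_line.split()
--     tgt_tags = tgt_tags_line.split()
--     src_pair_tags, tgt_pair_tags = [], []
--
--     for i, src_tag in enumerate(src_tags):
--         pair_tags = [f'{src_tag}-{tgt_tags[j]}' for j in align_dict[i]]
--         if len(pair_tags) == 0:
--             pair_tag = f'{src_tag}-NULL'
--         else:
--             pt_counter = collections.Counter(pair_tags)
--             pair_tag = pt_counter.most_common()[0][0]
--         src_pair_tags.append(pair_tag)
--
--     for j, tgt_tag in enumerate(tgt_tags):
--         pair_tags = [f'{tgt_tag}-{src_tags[i]}' for i in rev_align_dict[j]]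
--         if len(pair_tags) == 0:
--             pair_tag = f'{tgt_tag}-NULL'
--         else:
--             pt_counter = collections.Counter(pair_tags)
--             pair_tag = pt_counter.most_common()[0][0]
--         tgt_pair_tags.append(pair_tag)
--
--     return src_pair_tags, tgt_pair_tags
-- ===== SOURCE B (Python) =====
-- def generate_pair_tags(align_line, src_tags_line, tgt_tags_line):
--     # No adjacency dictionaries and no Counters: parse the alignment once into a
--     # pair list, and for each token take the pair tags of its alignments directly
--     # from that list and pick the winner with max over the first-occurrence-ordered
--     # distinct tags keyed by count (== Counter.most_common()[0][0] tie-breaking).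
--     src_tags = src_tags_line.split()
--     tgt_tags = tgt_tags_line.split()
--     pairs = [tuple(map(int, a.split('-'))) for a in align_line.split()]
--
--     def best(tag, labels):
--         if not labels:
--             return f'{tag}-NULL'
--         return max(dict.fromkeys(labels), key=labels.count)
--
--     src_pair_tags = [best(t, [f'{t}-{tgt_tags[j]}' for (i, j) in pairs if i == k])
--                      for k, t in enumerate(src_tags)]
--     tgt_pair_tags = [best(t, [f'{t}-{src_tags[i]}' for (i, j) in pairs if j == k])
--                      for k, t in enumerate(tgt_tags)]
--     return src_pair_tags, tgt_pair_tags
-- ===== Notes on version B (the rewrite author's own statement) =====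
-- stated objective: simpler
-- what changed: Drops A's two alignment-adjacency dictionaries, the per-token Counter and its most_common sort: B parses the alignment once into a pair list, filters it directly per token, and picks the winner with max over the first-occurrence-ordered distinct tags keyed by list.count.
import Mathlib
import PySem

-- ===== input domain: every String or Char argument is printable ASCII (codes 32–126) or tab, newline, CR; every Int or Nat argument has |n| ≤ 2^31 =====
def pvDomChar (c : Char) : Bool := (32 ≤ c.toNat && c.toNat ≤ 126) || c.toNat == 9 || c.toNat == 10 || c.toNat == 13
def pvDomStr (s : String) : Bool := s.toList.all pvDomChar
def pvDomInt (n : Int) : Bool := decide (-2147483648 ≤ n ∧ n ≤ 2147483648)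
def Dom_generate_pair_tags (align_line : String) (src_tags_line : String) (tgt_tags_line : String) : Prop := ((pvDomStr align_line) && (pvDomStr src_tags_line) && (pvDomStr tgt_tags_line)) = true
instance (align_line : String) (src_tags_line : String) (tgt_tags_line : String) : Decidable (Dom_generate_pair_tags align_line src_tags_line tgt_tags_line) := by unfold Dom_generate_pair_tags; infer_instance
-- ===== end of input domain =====

-- B drops A's two adjacency dictionaries, the per-token Counter and its most_common sort: it filters the
-- parsed pair list per token and takes max over the first-occurrence-ordered distinct tags keyed by count
-- (objective: simpler; same return value, not claimed faster).

-- shared port of a library fragment both Pythons use: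
-- `i, j = map(int, a.split('-'))` (none exactly where Python raises ValueError)
def pvParsePair (a : String) : Option (Int × Int) :=
  match PySem.Str.split? a "-" with
  | some [s1, s2] =>
      match PySem.Int.ofStr? s1, PySem.Int.ofStr? s2 with
      | some i, some j => some (i, j)
      | _, _ => none
  | _ => none

-- ===== PORT A =====
-- `c.most_common()[0][0]` (CPython: sorted(items, key=itemgetter(1), reverse=True)); callers guard nonemptiness
def pvMostCommon (c : PySem.Dict String Int) : String :=
  ((PySem.List.sorted c.items (fun p => p.2) true).headD ("", 0)).1

def get_align_dict (aligns : String) (reverse : Bool) : PySem.Dict Int (List Int) :=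
  (PySem.Str.split₀ aligns).foldl (fun d a =>
    match pvParsePair a with
    | some p =>
        if reverse then d.insert p.2 (d.getD p.2 [] ++ [p.1])
        else d.insert p.1 (d.getD p.1 [] ++ [p.2])
    | none => d) PySem.Dict.empty

def generate_pair_tags (align_line : String) (src_tags_line : String) (tgt_tags_line : String) : List String × List String :=
  let align_dict := get_align_dict align_line false
  let rev_align_dict := get_align_dict align_line true
  let src_tags := PySem.Str.split₀ src_tags_line
  let tgt_tags := PySem.Str.split₀ tgt_tags_line
  let src_pair_tags := (PySem.List.enumerate src_tags).foldl (fun acc p =>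
      let pair_tags := (align_dict.getD p.1 []).map (fun j => p.2 ++ "-" ++ PySem.List.pyGetD tgt_tags j "")
      let pair_tag := if pair_tags = [] then p.2 ++ "-NULL"
        else pvMostCommon (PySem.Dict.counter pair_tags)
      acc ++ [pair_tag]) []
  let tgt_pair_tags := (PySem.List.enumerate tgt_tags).foldl (fun acc p =>
      let pair_tags := (rev_align_dict.getD p.1 []).map (fun i => p.2 ++ "-" ++ PySem.List.pyGetD src_tags i "")
      let pair_tag := if pair_tags = [] then p.2 ++ "-NULL"
        else pvMostCommon (PySem.Dict.counter pair_tags)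
      acc ++ [pair_tag]) []
  (src_pair_tags, tgt_pair_tags)

-- ===== PORT B =====
-- `max(dict.fromkeys(labels), key=labels.count)` on nonempty labels (the caller guards; getD "" is the total form)
def pvBest (tag : String) (labels : List String) : String :=
  if labels = [] then tag ++ "-NULL"
  else (PySem.List.max? (PySem.List.dedup labels) (fun t => PySem.List.count labels t)).getD ""

def generate_pair_tags_alt (align_line : String) (src_tags_line : String) (tgt_tags_line : String) : List String × List String :=
  let src_tags := PySem.Str.split₀ src_tags_line
  let tgt_tags := PySem.Str.split₀ tgt_tags_line
  -- `[tuple(map(int, a.split('-'))) for a in align_line.split()]` (none = ValueError, outside Pre_)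
  let pairs := (PySem.Str.split₀ align_line).filterMap pvParsePair
  let src_pair_tags := (PySem.List.enumerate src_tags).map (fun p =>
      pvBest p.2 ((pairs.filter (fun q => q.1 == p.1)).map
        (fun q => p.2 ++ "-" ++ PySem.List.pyGetD tgt_tags q.2 "")))
  let tgt_pair_tags := (PySem.List.enumerate tgt_tags).map (fun p =>
      pvBest p.2 ((pairs.filter (fun q => q.2 == p.1)).map
        (fun q => p.2 ++ "-" ++ PySem.List.pyGetD src_tags q.1 "")))
  (src_pair_tags, tgt_pair_tags)

-- ===== PRECONDITION & SPEC =====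
-- a token is well-formed iff `int-int` parses and its two indices are in range on both sides or on neither
def pvTokOK (S T : Int) (a : String) : Bool :=
  match pvParsePair a with
  | some (i, j) => decide (i < S) == decide (j < T)
  | none => false

-- Pre_ excludes exactly the inputs where A raises: a ValueError from a malformed `i-j` token, or an
-- IndexError from a pair whose index is in range on one side while its partner index is out of range.
def Pre_generate_pair_tags (align_line : String) (src_tags_line : String) (tgt_tags_line : String) : Prop :=
  ∀ a ∈ PySem.Str.split₀ align_line,
    pvTokOK (PySem.List.len (PySem.Str.split₀ src_tags_line)) (PySem.List.len (PySem.Str.split₀ tgt_tags_line)) a = true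
instance (align_line : String) (src_tags_line : String) (tgt_tags_line : String) : Decidable (Pre_generate_pair_tags align_line src_tags_line tgt_tags_line) := by unfold Pre_generate_pair_tags; infer_instance

def pvWitness_generate_pair_tags : String × String × String := ("0-1 1-0 0-0 7-9", "N V", "D N")

def Spec_generate_pair_tags (align_line : String) (src_tags_line : String) (tgt_tags_line : String) (out : List String × List String) : Prop := out = generate_pair_tags_alt align_line src_tags_line tgt_tags_line
instance (align_line : String) (src_tags_line : String) (tgt_tags_line : String) (out : List String × List String) : Decidable (Spec_generate_pair_tags align_line src_tags_line tgt_tags_line out) := by unfold Spec_generate_pair_tags; infer_instance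

-- ===== CLAIM (what is proved, stated in full; the proofs are below) =====
def Claim_equal_generate_pair_tags : Prop := ∀ (align_line : String) (src_tags_line : String) (tgt_tags_line : String), Dom_generate_pair_tags align_line src_tags_line tgt_tags_line → Pre_generate_pair_tags align_line src_tags_line tgt_tags_line → Spec_generate_pair_tags align_line src_tags_line tgt_tags_line (generate_pair_tags align_line src_tags_line tgt_tags_line)

-- ===== LEMMAS AND PROOFS =====

-- the alignment pairs, in alignment-line order (malformed tokens dropped; Pre_ excludes them anyway)
def pvPairs (al : String) : List (Int × Int) := (PySem.Str.split₀ al).filterMap pvParsePair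

-- a fold over the raw tokens that skips unparsable ones is a fold over the parsed pairs
theorem pv_foldl_tokens {β : Type} (l : List String) (g : β → Int × Int → β) (init : β) :
    l.foldl (fun acc a => match pvParsePair a with | some p => g acc p | none => acc) init
      = (l.filterMap pvParsePair).foldl g init := by
  induction l generalizing init with
  | nil => rfl
  | cons a l ih => cases h : pvParsePair a <;> simp [h, ih]

theorem get_align_dict_eq (al : String) (rev : Bool) :
    get_align_dict al rev = (pvPairs al).foldl (fun d p =>
      if rev then d.insert p.2 (d.getD p.2 [] ++ [p.1]) else d.insert p.1 (d.getD p.1 [] ++ [p.2]))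
      PySem.Dict.empty := by
  unfold get_align_dict pvPairs
  exact pv_foldl_tokens _ _ _

theorem align_dict_getD_false (al : String) (c : Int) :
    (get_align_dict al false).getD c [] = ((pvPairs al).filter (fun p => p.1 == c)).map (·.2) := by
  rw [get_align_dict_eq]
  have h := PySem.Dict.getD_foldl_modify_append (pvPairs al) (PySem.Dict.empty (κ := Int) (ν := List Int)) c
  simpa using h

theorem align_dict_getD_true (al : String) (c : Int) :
    (get_align_dict al true).getD c [] = ((pvPairs al).filter (fun p => p.2 == c)).map (·.1) := by
  rw [get_align_dict_eq]
  have h := PySem.Dict.getD_foldl_modify_append ((pvPairs al).map Prod.swap) (PySem.Dict.empty (κ := Int) (ν := List Int)) c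
  rw [List.foldl_map] at h
  simp only [Prod.fst_swap, Prod.snd_swap] at h
  rw [List.filter_map, List.map_map] at h
  simpa [Function.comp] using h

-- head of the insertion step depends only on the head of the accumulator
theorem head?_insertBy {α : Type} (before : α → α → Bool) (x : α) (ys : List α) :
    (PySem.List.insertBy before x ys).head? =
      some (match ys with | [] => x | y :: _ => if before x y then x else y) := by
  cases ys with
  | nil => rfl
  | cons y ys => simp only [PySem.List.insertBy]; split <;> simp

-- the head of a stable descending sort is the FIRST key-maximal element: exactly max?
theorem head_sorted_rev_eq_max? {α κ : Type} [LinearOrder κ] (xs : List α) (key : α → κ) :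
    (PySem.List.sorted xs key true).head? = PySem.List.max? xs key := by
  rw [PySem.List.sorted_rev_eq_foldl_insertBy]
  unfold PySem.List.max?
  suffices h : ∀ (acc : List α),
      (xs.foldl (fun acc x => PySem.List.insertBy (fun a b => decide (key b < key a)) x acc) acc).head?
        = xs.foldl (fun (a : Option α) x =>
            match a with
            | none => some x
            | some m => if key m < key x then some x else some m) acc.head? by
    simpa using h []
  induction xs with
  | nil => intro acc; rfl
  | cons x xs ih =>
      intro acc
      rw [List.foldl_cons, List.foldl_cons, ih]
      congr 1
      cases acc with
      | nil => rfl
      | cons y ys =>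
          rw [head?_insertBy]
          simp only [List.head?_cons]
          split <;> simp_all

-- max? commutes with map
theorem max?_map {α β κ : Type} [LT κ] [DecidableLT κ] (xs : List α) (f : α → β) (key : β → κ) :
    PySem.List.max? (xs.map f) key = (PySem.List.max? xs (fun x => key (f x))).map f := by
  unfold PySem.List.max?
  rw [List.foldl_map]
  suffices h : ∀ (acc : Option α),
      xs.foldl (fun (a : Option β) x =>
          match a with
          | none => some (f x)
          | some m => if key m < key (f x) then some (f x) else some m) (acc.map f)
        = (xs.foldl (fun (a : Option α) x =>
            match a with
            | none => some x
            | some m => if key (f m) < key (f x) then some x else some m) acc).map f by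
    simpa using h none
  induction xs with
  | nil => intro acc; rfl
  | cons x xs ih =>
      intro acc
      rw [List.foldl_cons, List.foldl_cons]
      cases acc with
      | none => exact ih (some x)
      | some m =>
          simp only [Option.map_some]
          by_cases hc : key (f m) < key (f x)
          · simp only [if_pos hc]; exact ih (some x)
          · simp only [if_neg hc]; exact ih (some m)

-- max? only looks at key comparisons: a Nat-count key and its Int cast agree
theorem max?_key_natCast {α : Type} (xs : List α) (key : α → Nat) :
    PySem.List.max? xs (fun x => ((key x : Nat) : Int)) = PySem.List.max? xs key := by
  unfold PySem.List.max?
  simp only [Nat.cast_lt]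

-- the core fact: Counter(L).most_common()[0][0] = max(dict.fromkeys(L), key=L.count) for nonempty L
theorem mostCommon_eq_best (tag : String) (L : List String) :
    (if L = [] then tag ++ "-NULL" else pvMostCommon (PySem.Dict.counter L)) = pvBest tag L := by
  unfold pvBest
  rcases eq_or_ne L [] with h | h
  · simp [h]
  · obtain ⟨a, L', rfl⟩ := List.exists_cons_of_ne_nil h
    rw [if_neg h]
    unfold pvMostCommon
    have h1 := head_sorted_rev_eq_max? (PySem.Dict.counter (a :: L')).items (fun p => p.2)
    rw [PySem.Dict.items_counter] at h1 ⊢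
    rw [max?_map, max?_key_natCast] at h1
    have hne : PySem.Set.ofList (a :: L') ≠ [] := by
      intro hc
      have : a ∈ PySem.Set.ofList (a :: L') := by
        rw [PySem.Set.mem_ofList]; exact List.mem_cons_self
      simp [hc] at this
    obtain ⟨m, hm⟩ := Option.ne_none_iff_exists'.mp
      (show PySem.List.max? (PySem.Set.ofList (a :: L')) (fun k => List.count k (a :: L')) ≠ none from
        fun hc => hne ((PySem.List.max?_eq_none_iff _ _).mp hc))
    rw [hm] at h1
    simp only [Option.map_some] at h1
    have hhd : (PySem.List.sorted
        ((PySem.Set.ofList (a :: L')).map (fun k => (k, (List.count k (a :: L') : Int))))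
        (fun p => p.2) true).headD ("", 0) = (m, (List.count m (a :: L') : Int)) := by
      cases hs : PySem.List.sorted
          ((PySem.Set.ofList (a :: L')).map (fun k => (k, (List.count k (a :: L') : Int))))
          (fun p => p.2) true with
      | nil => rw [hs] at h1; simp at h1
      | cons z zs => rw [hs] at h1; simp at h1; simp [h1]
    rw [hhd]
    rw [PySem.List.dedup_eq_ofList]
    have hcnt : (fun t => PySem.List.count (a :: L') t) = fun t => List.count t (a :: L') := rfl
    rw [hcnt, hm]
    rfl

-- ===== VERDICT (by name: the statement is the Claim_ definition above) =====
theorem generate_pair_tags_spec : Claim_equal_generate_pair_tags := by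
  intro al st tt _ _
  unfold Spec_generate_pair_tags
  simp only [generate_pair_tags, generate_pair_tags_alt]
  simp only [PySem.List.foldl_append_singleton_eq_map, List.nil_append]
  have hp : (PySem.Str.split₀ al).filterMap pvParsePair = pvPairs al := rfl
  rw [hp]
  refine Prod.ext ?_ ?_ <;>
  · apply List.map_congr_left
    intro p _
    simp only [align_dict_getD_false, align_dict_getD_true, List.map_map]
    exact mostCommon_eq_best p.2 _
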